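-- pv_equiv track=rewrite | github.com/Tony-sama/pylfit | tests/examples/sequences_learning/sequence_properties.py | alt_succession
-- ===== SOURCE A (Python) =====
-- def alt_response(events, sequence):
--     features = []
--     values = []
--     for ei in sorted(events):
--         for ej in sorted(events):
--             if(ei == ej):
--                 continue
--             features.append("alt_response_"+str(ei)+"_"+str(ej))
--
--             value = True
--             expect_ej = False
--             for e in sequence:
--                 if(expect_ej and e == ei):
--                     value = False
--                     break
--
--                 if(e == ei):
--                     expect_ej = True
--                     continue
--
--                 if(e == ej):
--                     expect_ej = False
--
--             if(expect_ej):
--                 value = False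
--
--             values.append(value)
--     return features, values
--
-- def alt_precedence(events, sequence):
--     features = []
--     values = []
--     for ei in sorted(events):
--         for ej in sorted(events):
--             if(ei == ej):
--                 continue
--             features.append("alt_precedence_"+str(ei)+"_"+str(ej))
--             value = True
--             expect_ei = False
--             for e in reversed(sequence):
--                 if(expect_ei and e == ej):
--                     value = False
--                     break
--
--                 if(e == ej):
--                     expect_ei = True
--                     continue
--
--                 if(e == ei):
--                     expect_ei = False
--
--             if(expect_ei):
--                 value = False
--
--             values.append(value)
--     return features, values
--
-- def alt_succession(events, sequence):
--     features = []
--     values = []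
--     for ei in sorted(events):
--         for ej in sorted(events):
--             if(ei == ej):
--                 continue
--             features.append("alt_succession_"+str(ei)+"_"+str(ej))
--
--     values = [a and b for a, b in zip(alt_response(events, sequence)[1], alt_precedence(events, sequence)[1])]
--     return features, values
-- ===== SOURCE B (Python) =====
-- def _alternates(ei, ej, r):
--     it = iter(r)
--     for a in it:
--         b = next(it, None)
--         if a != ei or b != ej:
--             return False
--     return True
--
-- def alt_succession(events, sequence):
--     features = []
--     values = []
--     ev = sorted(events)
--     for ei in ev:
--         for ej in ev:
--             if ei == ej:
--                 continue
--             features.append("alt_succession_" + str(ei) + "_" + str(ej))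
--             r = [e for e in sequence if e == ei or e == ej]
--             values.append(_alternates(ei, ej, r))
--     return features, values
-- ===== Notes on version B (the rewrite author's own statement) =====
-- stated objective: alternative
-- what changed: Instead of A's two whole-sequence flag-state scans per pair (alt_response forward and alt_precedence backward, each also rebuilding a discarded feature-string list, then zipped with and), B filters the sequence down to the pair's two events once and directly checks that the filtered list is the even alternation ei,ej,ei,ej,...; no helper passes, no reversal, no throw-away string building.
import Mathlib
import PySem

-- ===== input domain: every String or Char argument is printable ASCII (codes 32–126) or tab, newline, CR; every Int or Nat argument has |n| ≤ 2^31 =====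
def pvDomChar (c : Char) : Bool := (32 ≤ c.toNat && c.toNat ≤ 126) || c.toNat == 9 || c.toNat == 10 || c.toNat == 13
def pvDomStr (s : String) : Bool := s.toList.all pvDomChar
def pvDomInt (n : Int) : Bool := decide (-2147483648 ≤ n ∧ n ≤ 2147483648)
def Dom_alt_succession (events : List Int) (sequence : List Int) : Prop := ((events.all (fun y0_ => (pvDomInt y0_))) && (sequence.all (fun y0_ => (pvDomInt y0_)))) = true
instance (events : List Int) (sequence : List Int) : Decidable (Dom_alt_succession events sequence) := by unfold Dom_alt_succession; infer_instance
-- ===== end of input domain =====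

-- B replaces A's two whole-sequence flag scans (alt_response + alt_precedence, zipped) by one
-- per-pair filter to the two events plus a direct even-alternation check; objective: alternative.

-- ===== PORT A =====
-- inner loop of alt_response: value/expect_ej state over sequence
def respGo (ei ej : Int) (expect : Bool) : List Int → Bool
  | [] => !expect
  | e :: t =>
    if expect && e == ei then false
    else if e == ei then respGo ei ej true t
    else if e == ej then respGo ei ej false t
    else respGo ei ej expect t

-- inner loop of alt_precedence: value/expect_ei state over reversed(sequence)
def precGo (ei ej : Int) (expect : Bool) : List Int → Bool
  | [] => !expect
  | e :: t =>
    if expect && e == ej then false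
    else if e == ej then precGo ei ej true t
    else if e == ei then precGo ei ej false t
    else precGo ei ej expect t

def alt_response (events : List Int) (sequence : List Int) : List String × List Bool :=
  let se := PySem.List.sorted events (fun x => x) false
  se.foldl (fun acc ei =>
    se.foldl (fun acc ej =>
      if ei == ej then acc
      else (acc.1 ++ ["alt_response_" ++ PySem.Int.toStr ei ++ "_" ++ PySem.Int.toStr ej],
            acc.2 ++ [respGo ei ej false sequence])) acc) ([], [])

def alt_precedence (events : List Int) (sequence : List Int) : List String × List Bool :=
  let se := PySem.List.sorted events (fun x => x) false
  se.foldl (fun acc ei =>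
    se.foldl (fun acc ej =>
      if ei == ej then acc
      else (acc.1 ++ ["alt_precedence_" ++ PySem.Int.toStr ei ++ "_" ++ PySem.Int.toStr ej],
            acc.2 ++ [precGo ei ej false sequence.reverse])) acc) ([], [])

def alt_succession (events : List Int) (sequence : List Int) : List String × List Bool :=
  let se := PySem.List.sorted events (fun x => x) false
  let features := se.foldl (fun acc ei =>
    se.foldl (fun acc ej =>
      if ei == ej then acc
      else acc ++ ["alt_succession_" ++ PySem.Int.toStr ei ++ "_" ++ PySem.Int.toStr ej]) acc)
    ([] : List String)
  let values := (List.zip (alt_response events sequence).2 (alt_precedence events sequence).2).map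
    (fun p => p.1 && p.2)
  (features, values)

-- ===== PORT B =====
-- B helper _alternates: consume the filtered list two at a time, expecting ei then ej
def isAltB (ei ej : Int) : List Int → Bool
  | [] => true
  | [_] => false
  | a :: b :: t => if !(a == ei) || !(b == ej) then false else isAltB ei ej t

def alt_succession_alt (events : List Int) (sequence : List Int) : List String × List Bool :=
  let se := PySem.List.sorted events (fun x => x) false
  se.foldl (fun acc ei =>
    se.foldl (fun acc ej =>
      if ei == ej then acc
      else (acc.1 ++ ["alt_succession_" ++ PySem.Int.toStr ei ++ "_" ++ PySem.Int.toStr ej],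
            acc.2 ++ [isAltB ei ej (sequence.filter (fun e => e == ei || e == ej))])) acc) ([], [])

-- ===== PRECONDITION & SPEC =====
def Spec_alt_succession (events : List Int) (sequence : List Int) (out : List String × List Bool) : Prop := out = alt_succession_alt events sequence
instance (events : List Int) (sequence : List Int) (out : List String × List Bool) : Decidable (Spec_alt_succession events sequence out) := by unfold Spec_alt_succession; infer_instance

-- ===== CLAIM (what is proved, stated in full; the proofs are below) =====
def Claim_equal_alt_succession : Prop := ∀ (events : List Int) (sequence : List Int), Dom_alt_succession events sequence → Spec_alt_succession events sequence (alt_succession events sequence)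

-- ===== LEMMAS AND PROOFS =====

-- nested-loop shapes: pair-state fold with a skip test
theorem foldl_pair_if {α β γ : Type} (xs : List α) (c : α → Bool) (f : α → β) (g : α → γ)
    (p : List β × List γ) :
    xs.foldl (fun acc x => if c x then acc else (acc.1 ++ [f x], acc.2 ++ [g x])) p
      = (p.1 ++ (xs.filter (fun x => !c x)).map f, p.2 ++ (xs.filter (fun x => !c x)).map g) := by
  induction xs generalizing p with
  | nil => simp
  | cons a t ih =>
    by_cases h : c a = true <;> simp [List.foldl_cons, h, ih]

theorem foldl_pair_flatMap {α β γ : Type} (xs : List α) (F : α → List β) (G : α → List γ)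
    (p : List β × List γ) :
    xs.foldl (fun acc x => (acc.1 ++ F x, acc.2 ++ G x)) p
      = (p.1 ++ xs.flatMap F, p.2 ++ xs.flatMap G) := by
  induction xs generalizing p with
  | nil => simp
  | cons a t ih => simp [List.foldl_cons, ih]

theorem foldl_single_if {α β : Type} (xs : List α) (c : α → Bool) (f : α → β) (a : List β) :
    xs.foldl (fun acc x => if c x then acc else acc ++ [f x]) a
      = a ++ (xs.filter (fun x => !c x)).map f := by
  induction xs generalizing a with
  | nil => simp
  | cons x t ih =>
    by_cases h : c x = true <;> simp [List.foldl_cons, h, ih]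

theorem zip_flatMap {α β γ : Type} (xs : List α) (F : α → List β) (G : α → List γ)
    (h : ∀ x, (F x).length = (G x).length) :
    List.zip (xs.flatMap F) (xs.flatMap G) = xs.flatMap (fun x => List.zip (F x) (G x)) := by
  induction xs with
  | nil => simp
  | cons a t ih => simp [List.zip_append (h a), ih]

-- precGo is respGo with the two events swapped
theorem precGo_eq_respGo (ei ej : Int) (l : List Int) (expect : Bool) :
    precGo ei ej expect l = respGo ej ei expect l := by
  induction l generalizing expect with
  | nil => rfl
  | cons e t ih => simp [precGo, respGo, ih]

-- the scan ignores elements that are neither event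
theorem respGo_filter (e1 e2 : Int) (p : Int → Bool)
    (hp : ∀ e, p e = false → (e == e1) = false ∧ (e == e2) = false) (l : List Int) (expect : Bool) :
    respGo e1 e2 expect l = respGo e1 e2 expect (l.filter p) := by
  induction l generalizing expect with
  | nil => rfl
  | cons e t ih =>
    by_cases h : p e = true
    · simp only [List.filter_cons, h, if_true]
      simp [respGo, ih]
    · have h' := hp e (by simpa using h)
      simp [h, respGo, h'.1, h'.2, ih]

theorem respGo_append_one (e1 e2 : Int) (xs : List Int) (expect : Bool) :
    respGo e1 e2 expect (xs ++ [e1]) = false := by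
  induction xs generalizing expect with
  | nil => simp [respGo]
  | cons a t ih => by_cases h1 : (a == e1) <;> by_cases h2 : (a == e2) <;>
      simp [respGo, h1, h2, ih]

theorem respGo_append_two (e1 e2 : Int) (h : e1 ≠ e2) (xs : List Int) (expect : Bool) :
    respGo e1 e2 expect (xs ++ [e1, e2]) = respGo e1 e2 expect xs := by
  induction xs generalizing expect with
  | nil => cases expect <;> simp [respGo, Ne.symm h]
  | cons a t ih => by_cases h1 : (a == e1) <;> by_cases h2 : (a == e2) <;>
      simp [respGo, h1, h2, ih]

-- main: on a list over {e1,e2}, forward scan && backward swapped scan = even alternation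
theorem main_alt (e1 e2 : Int) (h : e1 ≠ e2) :
    ∀ (n : Nat) (r : List Int), r.length ≤ n → (∀ e ∈ r, e = e1 ∨ e = e2) →
      (respGo e1 e2 false r && respGo e2 e1 false r.reverse) = isAltB e1 e2 r := by
  intro n
  induction n with
  | zero =>
    intro r hr _
    have : r = [] := List.length_eq_zero_iff.mp (Nat.le_zero.mp hr)
    subst this; rfl
  | succ n ih =>
    intro r hr hmem
    cases r with
    | nil => rfl
    | cons a t =>
      rcases hmem a (by simp) with ha | ha
      · cases t with
        | nil => rw [ha]; simp [respGo, isAltB]  -- r = [e1]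
        | cons b t2 =>
          rcases hmem b (by simp) with hb | hb
          · rw [ha, hb]
            simp [respGo, isAltB, h]
          · rw [ha, hb]
            have hrev : (e1 :: e2 :: t2).reverse = t2.reverse ++ [e2, e1] := by simp
            rw [hrev, respGo_append_two e2 e1 (Ne.symm h)]
            have hlen : t2.length ≤ n := by
              simp only [List.length_cons] at hr; omega
            have := ih t2 hlen (fun e he => hmem e (by simp [he]))
            have hstep1 : respGo e1 e2 false (e1 :: e2 :: t2) = respGo e1 e2 false t2 := by
              simp [respGo, Ne.symm h]
            have hstep2 : isAltB e1 e2 (e1 :: e2 :: t2) = isAltB e1 e2 t2 := by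
              simp [isAltB]
            rw [hstep1, hstep2, this]
      · rw [ha]
        have hrev : (e2 :: t).reverse = t.reverse ++ [e2] := by simp
        rw [hrev, respGo_append_one]
        cases t with
        | nil => simp [isAltB]
        | cons b t2 => simp [isAltB, Ne.symm h]

-- per ordered pair, A's combined value equals B's filtered alternation check
theorem pair_value (e1 e2 : Int) (h : e1 ≠ e2) (sq : List Int) :
    (respGo e1 e2 false sq && precGo e1 e2 false sq.reverse)
      = isAltB e1 e2 (sq.filter (fun e => e == e1 || e == e2)) := by
  have hp : ∀ e, (e == e1 || e == e2) = false → (e == e1) = false ∧ (e == e2) = false := by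
    intro e he; constructor <;> simp_all
  have hp' : ∀ e, (e == e1 || e == e2) = false → (e == e2) = false ∧ (e == e1) = false := by
    intro e he; constructor <;> simp_all
  rw [precGo_eq_respGo,
    respGo_filter e1 e2 _ hp sq false,
    respGo_filter e2 e1 _ hp' sq.reverse false,
    List.filter_reverse]
  exact main_alt e1 e2 h (sq.filter (fun e => e == e1 || e == e2)).length _ (le_refl _)
    (fun e he => by
      have := List.of_mem_filter he
      rcases Bool.or_eq_true_iff.mp this with h1 | h1
      · exact Or.inl (by simpa using h1)
      · exact Or.inr (by simpa using h1))

-- ===== VERDICT (by name: the statement is the Claim_ definition above) =====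
theorem alt_succession_spec : Claim_equal_alt_succession := by
  intro events sequence _
  unfold Spec_alt_succession alt_succession alt_succession_alt alt_response alt_precedence
  simp only [foldl_pair_if, foldl_pair_flatMap, foldl_single_if,
    PySem.List.foldl_append_eq_flatMap, List.nil_append]
  refine Prod.ext rfl ?_
  rw [zip_flatMap _ _ _ (by intro x; simp)]
  rw [List.map_flatMap]
  apply List.flatMap_congr
  · intro ei _
    rw [List.zip_map', List.map_map]
    apply List.map_congr_left
    intro ej hej
    have hne : ei ≠ ej := by
      have := (List.mem_filter.mp hej).2
      simpa using this
    simpa using pair_value ei ej hne sequence
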